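-- pv_equiv track=rewrite | github.com/xlastfire/yt_downloader | loader.py | name_correction
-- ===== SOURCE A (Python) =====
-- def name_correction(song_name):
--     illegal = "#%&{}\\<>*?/$!'\":@+`|=\n\t()"
--     alphabet = 'asdfghjklqwertyuiopzxcvbnm QWERTYUIOPLKJHGFDSAZXCVBNM'
--     for each in illegal:
--         song_name = song_name.replace(each, '')
--     build = ''
--     for each in song_name:
--         if each in alphabet:
--             build += each
--     song_name = build
--     return '_'.join([word for word in song_name.split()])
-- ===== SOURCE B (Python) =====
-- def name_correction(song_name):
--     letters = 'abcdefghijklmnopqrstuvwxyzABCDEFGHIJKLMNOPQRSTUVWXYZ'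
--     words = []
--     for part in song_name.split(' '):
--         word = ''.join([c for c in part if c in letters])
--         if word:
--             words.append(word)
--     return '_'.join(words)
-- ===== Notes on version B (the rewrite author's own statement) =====
-- stated objective: simpler
-- what changed: Drops the 24-pass illegal-char replace loop entirely and reverses the order of operations: instead of filtering the whole string and then splitting on whitespace, B splits once on the space character and cleans each token to its ASCII letters, keeping non-empty words.
import Mathlib
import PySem

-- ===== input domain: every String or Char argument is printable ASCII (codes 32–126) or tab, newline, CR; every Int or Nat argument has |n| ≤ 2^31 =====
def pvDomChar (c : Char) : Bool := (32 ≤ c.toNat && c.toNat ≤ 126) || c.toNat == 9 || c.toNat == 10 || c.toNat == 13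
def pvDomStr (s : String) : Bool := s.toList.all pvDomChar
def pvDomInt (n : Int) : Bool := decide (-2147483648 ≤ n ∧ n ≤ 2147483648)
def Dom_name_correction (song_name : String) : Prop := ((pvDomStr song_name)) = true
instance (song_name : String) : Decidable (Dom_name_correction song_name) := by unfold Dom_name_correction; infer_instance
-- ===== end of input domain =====

-- B drops A's 24-pass illegal-char replace loop and swaps the order of filtering and
-- splitting: split once on ' ', keep only ASCII letters per token, join non-empty words.

-- ===== PORT A =====
def name_correction (song_name : String) : String :=
  let illegal : List Char := "#%&{}\\<>*?/$!'\":@+`|=\n\t()".toList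
  let s1 : List Char := illegal.foldl (fun acc c => PySem.Chars.replace acc [c] []) song_name.toList
  let alphabet : List Char := "asdfghjklqwertyuiopzxcvbnm QWERTYUIOPLKJHGFDSAZXCVBNM".toList
  let build : List Char := s1.foldl (fun b c => if PySem.Chars.isIn [c] alphabet then b ++ [c] else b) []
  String.mk (PySem.Chars.join ['_'] (PySem.Chars.split₀ build))

-- ===== PORT B =====
def name_correction_alt (song_name : String) : String :=
  let letters : List Char := "abcdefghijklmnopqrstuvwxyzABCDEFGHIJKLMNOPQRSTUVWXYZ".toList
  let words : List (List Char) := (PySem.Chars.splitOn song_name.toList [' ']).foldl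
    (fun ws part =>
      let word := part.filter (fun c => PySem.Chars.isIn [c] letters)
      if word.isEmpty then ws else ws ++ [word]) []
  String.mk (PySem.Chars.join ['_'] words)

-- ===== PRECONDITION & SPEC =====
def Spec_name_correction (song_name : String) (out : String) : Prop := out = name_correction_alt song_name
instance (song_name : String) (out : String) : Decidable (Spec_name_correction song_name out) := by unfold Spec_name_correction; infer_instance

-- ===== CLAIM (what is proved, stated in full; the proofs are below) =====
def Claim_equal_name_correction : Prop := ∀ (song_name : String), Dom_name_correction song_name → Spec_name_correction song_name (name_correction song_name)

-- ===== LEMMAS AND PROOFS =====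

-- proof-only helper alphabets
def pvAlphaA : List Char := "asdfghjklqwertyuiopzxcvbnm QWERTYUIOPLKJHGFDSAZXCVBNM".toList
def pvAlphaB : List Char := "abcdefghijklmnopqrstuvwxyzABCDEFGHIJKLMNOPQRSTUVWXYZ".toList
def pvIllegal : List Char := "#%&{}\\<>*?/$!'\":@+`|=\n\t()".toList

-- spec recursions mirroring the PySem split loops
def pvWsplit : List Char → List Char → List (List Char)
  | [], cur => if cur.isEmpty then [] else [cur.reverse]
  | c :: rest, cur =>
      if PySem.Chars.isspace c then
        (if cur.isEmpty then pvWsplit rest [] else cur.reverse :: pvWsplit rest [])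
      else pvWsplit rest (c :: cur)

def pvSsplit : List Char → List Char → List (List Char)
  | [], cur => [cur.reverse]
  | c :: rest, cur => if c = ' ' then cur.reverse :: pvSsplit rest [] else pvSsplit rest (c :: cur)

theorem split₀_go_eq (l : List Char) : ∀ cur acc,
    PySem.Chars.split₀.go l cur acc = acc.reverse ++ pvWsplit l cur := by
  induction l with
  | nil => intro cur acc; simp [PySem.Chars.split₀.go, pvWsplit]; split <;> simp
  | cons c rest ih =>
      intro cur acc
      simp only [PySem.Chars.split₀.go, pvWsplit]
      split
      · split
        · exact ih [] acc
        · rw [ih [] (cur.reverse :: acc)]; simp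
      · exact ih (c :: cur) acc

theorem splitOn_go_eq (l : List Char) : ∀ fuel cur acc, l.length ≤ fuel →
    PySem.Chars.splitOn.go [' '] fuel l cur acc = acc.reverse ++ pvSsplit l cur := by
  induction l with
  | nil =>
      intro fuel cur acc _
      cases fuel <;> simp [PySem.Chars.splitOn.go, pvSsplit]
  | cons c rest ih =>
      intro fuel cur acc h
      cases fuel with
      | zero => simp at h
      | succ n =>
          simp only [PySem.Chars.splitOn.go, pvSsplit, List.isPrefixOf]
          by_cases hc : c = ' '
          · subst hc
            simp only [beq_self_eq_true, Bool.true_and, List.isPrefixOf, if_pos]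
            rw [List.length_cons] at h
            rw [show (List.drop [' '].length (' ' :: rest)) = rest by simp,
                ih n [] (cur.reverse :: acc) (by omega)]
            simp
          · have hpre : ((' ' == c) && List.isPrefixOf ([] : List Char) rest) = false := by
              have : (' ' == c) = false := beq_eq_false_iff_ne.mpr (fun h' => hc h'.symm)
              simp [this]
            rw [if_neg (by simp [hpre]; exact fun h' => hc h'.symm), if_neg hc]
            rw [List.length_cons] at h
            exact ih n (c :: cur) acc (by omega)

theorem replace_go_eq (l : List Char) : ∀ fuel acc (c : Char), l.length ≤ fuel →
    PySem.Chars.replace.go [c] [] fuel l acc = acc.reverse ++ l.filter (fun x => x != c) := by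
  induction l with
  | nil => intro fuel acc c _; cases fuel <;> simp [PySem.Chars.replace.go]
  | cons d rest ih =>
      intro fuel acc c h
      cases fuel with
      | zero => simp at h
      | succ n =>
          rw [List.length_cons] at h
          simp only [PySem.Chars.replace.go, List.isPrefixOf, List.filter]
          by_cases hc : c = d
          · subst hc
            simp only [beq_self_eq_true, Bool.true_and, List.isPrefixOf, if_pos,
              List.reverse_nil, List.nil_append]
            rw [show (List.drop [c].length (c :: rest)) = rest by simp,
                ih n acc c (by omega)]
            simp
          · have hne : (c == d) = false := by simp [hc]
            rw [if_neg (by simp [hne]), ih n (d :: acc) c (by omega)]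
            have hne' : (d != c) = true := by
              simp only [bne_iff_ne, ne_eq]
              exact Ne.symm hc
            simp [hne']

theorem replace_single (s : List Char) (c : Char) :
    PySem.Chars.replace s [c] [] = s.filter (fun x => x != c) := by
  simp only [PySem.Chars.replace, List.isEmpty_cons, if_neg]
  simpa using replace_go_eq s s.length [] c le_rfl

theorem isIn_single (c : Char) (L : List Char) :
    PySem.Chars.isIn [c] L = L.contains c := by
  rw [Bool.eq_iff_iff, PySem.Chars.isIn_iff_infix, List.contains_eq_mem, decide_eq_true_iff]
  constructor
  · intro h; exact h.subset (by simp)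
  · intro h
    obtain ⟨l1, l2, rfl⟩ := List.append_of_mem h
    exact ⟨l1, l2, by simp⟩

theorem filter_removeAll (q : Char → Bool) (il : List Char) :
    ∀ s : List Char, (∀ c ∈ il, ∀ x, q x = true → x ≠ c) →
    (il.foldl (fun a c => PySem.Chars.replace a [c] []) s).filter q = s.filter q := by
  induction il with
  | nil => intro s _; rfl
  | cons c rest ih =>
      intro s h
      simp only [List.foldl_cons]
      rw [ih _ (fun d hd x hx => h d (by simp [hd]) x hx), replace_single,
          List.filter_filter]
      apply List.filter_congr
      intro x _
      by_cases hq : q x = true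
      · simp [hq, h c (by simp) x hq]
      · simp [Bool.eq_false_iff.mpr hq]

-- character-class facts (concrete alphabets)
theorem memA_iff (c : Char) : c ∈ pvAlphaA ↔ (c ∈ pvAlphaB ∨ c = ' ') := by
  have hperm : pvAlphaA.Perm (pvAlphaB ++ [' ']) := by decide
  rw [hperm.mem_iff]; simp

theorem memB_not_space (c : Char) (h : c ∈ pvAlphaB) : PySem.Chars.isspace c = false := by
  have : pvAlphaB.all (fun c => !PySem.Chars.isspace c) = true := by decide
  have := List.all_eq_true.mp this c h
  simpa using this

theorem space_isspace : PySem.Chars.isspace ' ' = true := by decide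

theorem illegal_not_kept : ∀ c ∈ pvIllegal, ∀ x, pvAlphaA.contains x = true → x ≠ c := by
  intro c hc x hx rfl
  have hmem : x ∈ pvAlphaA := by simpa using hx
  have hall : pvAlphaA.all (fun d => !pvIllegal.contains d) = true := by decide
  have h2 := List.all_eq_true.mp hall x hmem
  simp at h2
  exact h2 hc

-- MAIN: cleaned space-split of the raw string = whitespace-split of the filtered string
theorem main_split (l : List Char) : ∀ cur,
    ((pvSsplit l cur).map (List.filter (fun c => pvAlphaB.contains c))).filter (fun w => !w.isEmpty)
      = pvWsplit (l.filter (fun c => pvAlphaA.contains c)) (cur.filter (fun c => pvAlphaB.contains c)) := by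
  induction l with
  | nil =>
      intro cur
      simp only [pvSsplit, pvWsplit, List.map_cons, List.map_nil, List.filter_cons,
        List.filter_nil, List.filter_reverse, List.isEmpty_reverse]
      cases hE : (List.filter (fun c => pvAlphaB.contains c) cur).isEmpty <;> simp [hE]
  | cons c rest ih =>
      intro cur
      by_cases hsp : c = ' '
      · subst hsp
        have hkeep : pvAlphaA.contains ' ' = true := by decide
        simp only [pvSsplit, if_pos rfl, List.map_cons, List.filter_cons, hkeep,
          List.filter_reverse, List.isEmpty_reverse, pvWsplit, space_isspace, if_true]
        rw [ih []]
        cases hE : (List.filter (fun c => pvAlphaB.contains c) cur).isEmpty <;>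
          simp [hE, List.filter_nil]
      · by_cases hB : pvAlphaB.contains c = true
        · have hmemB : c ∈ pvAlphaB := by simpa using hB
          have hkeep : pvAlphaA.contains c = true := by
            simp [List.contains_eq_mem, (memA_iff c).mpr (Or.inl hmemB)]
          simp only [pvSsplit, if_neg hsp, List.filter_cons, hkeep, if_true, pvWsplit,
            memB_not_space c hmemB]
          rw [ih (c :: cur)]
          simp [List.filter_cons, hB, hmemB, pvWsplit, memB_not_space c hmemB]
        · have hkeep : pvAlphaA.contains c = false := by
            simp only [List.contains_eq_mem, decide_eq_false_iff_not]
            intro hmem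
            rcases (memA_iff c).mp hmem with h | h
            · exact hB (by simp [List.contains_eq_mem, h])
            · exact hsp h
          have hnot : c ∉ pvAlphaB := by simpa using hB
          simp only [pvSsplit, if_neg hsp, List.filter_cons, hkeep]
          rw [ih (c :: cur)]
          simp [List.filter_cons, hnot]

theorem split₀_eq (l : List Char) : PySem.Chars.split₀ l = pvWsplit l [] := by
  simpa using split₀_go_eq l [] []

theorem splitOn_space_eq (l : List Char) :
    PySem.Chars.splitOn l [' '] = pvSsplit l [] := by
  simpa using splitOn_go_eq l (l.length + 1) [] [] (by omega)

theorem foldl_words (parts : List (List Char)) : ∀ acc : List (List Char),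
    parts.foldl (fun ws part =>
      let word := List.filter (fun c => pvAlphaB.contains c) part
      if word.isEmpty then ws else ws ++ [word]) acc
    = acc ++ (parts.map (List.filter (fun c => pvAlphaB.contains c))).filter (fun w => !w.isEmpty) := by
  induction parts with
  | nil => intro acc; simp
  | cons p rest ih =>
      intro acc
      have step : (let word := List.filter (fun c => pvAlphaB.contains c) p
          if word.isEmpty then acc else acc ++ [word])
          = if (List.filter (fun c => pvAlphaB.contains c) p).isEmpty then acc
            else acc ++ [List.filter (fun c => pvAlphaB.contains c) p] := rfl
      rcases Bool.eq_false_or_eq_true ((List.filter (fun c => pvAlphaB.contains c) p).isEmpty) with hE | hE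
      · rw [List.foldl_cons, step, hE, if_pos rfl, ih, List.map_cons, List.filter_cons, hE]
        simp
      · rw [List.foldl_cons, step, hE, if_neg (by simp), ih, List.map_cons, List.filter_cons, hE]
        simp

-- ===== VERDICT (by name: the statement is the Claim_ definition above) =====
set_option maxHeartbeats 1000000 in
theorem name_correction_spec : Claim_equal_name_correction := by
  intro s _
  show name_correction s = name_correction_alt s
  have eA : name_correction s = String.mk (PySem.Chars.join ['_'] (PySem.Chars.split₀
      ((("#%&{}\\<>*?/$!'\":@+`|=\n\t()".toList).foldl
          (fun acc c => PySem.Chars.replace acc [c] []) s.toList).foldl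
        (fun b c => if PySem.Chars.isIn [c] "asdfghjklqwertyuiopzxcvbnm QWERTYUIOPLKJHGFDSAZXCVBNM".toList then b ++ [c] else b) []))) := rfl
  have eB : name_correction_alt s = String.mk (PySem.Chars.join ['_']
      ((PySem.Chars.splitOn s.toList [' ']).foldl
        (fun ws part =>
          let word := part.filter (fun c => PySem.Chars.isIn [c] "abcdefghijklmnopqrstuvwxyzABCDEFGHIJKLMNOPQRSTUVWXYZ".toList)
          if word.isEmpty then ws else ws ++ [word]) [])) := rfl
  have hA : (("#%&{}\\<>*?/$!'\":@+`|=\n\t()".toList).foldl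
      (fun acc c => PySem.Chars.replace acc [c] []) s.toList).foldl
      (fun b c => if PySem.Chars.isIn [c] "asdfghjklqwertyuiopzxcvbnm QWERTYUIOPLKJHGFDSAZXCVBNM".toList then b ++ [c] else b) []
      = (s.toList).filter (fun c => pvAlphaA.contains c) := by
    rw [PySem.List.foldl_append_if_eq_filter]
    have hfun : (fun c => PySem.Chars.isIn [c] "asdfghjklqwertyuiopzxcvbnm QWERTYUIOPLKJHGFDSAZXCVBNM".toList)
        = (fun c => pvAlphaA.contains c) := by
      funext c; rw [isIn_single]; rfl
    rw [hfun, List.nil_append]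
    exact filter_removeAll (fun c => pvAlphaA.contains c) pvIllegal s.toList illegal_not_kept
  have hB : ((PySem.Chars.splitOn s.toList [' ']).foldl
      (fun ws part =>
        let word := part.filter (fun c => PySem.Chars.isIn [c] "abcdefghijklmnopqrstuvwxyzABCDEFGHIJKLMNOPQRSTUVWXYZ".toList)
        if word.isEmpty then ws else ws ++ [word]) [])
      = ((pvSsplit s.toList []).map (List.filter (fun c => pvAlphaB.contains c))).filter (fun w => !w.isEmpty) := by
    rw [splitOn_space_eq]
    have hfun : (fun c => PySem.Chars.isIn [c] "abcdefghijklmnopqrstuvwxyzABCDEFGHIJKLMNOPQRSTUVWXYZ".toList)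
        = (fun c => pvAlphaB.contains c) := by
      funext c; rw [isIn_single]; rfl
    simp only [hfun]
    rw [foldl_words, List.nil_append]
  rw [eA, eB, hA, hB, main_split s.toList [], split₀_eq]
  rfl
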